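-- pv_equiv track=rewrite | github.com/roytian1992/NarrativeKnowledgeWeaver | core/builder/event_first_extractor.py | _dedup_open_entities
-- ===== SOURCE A (Python) =====
-- from typing import Any, Dict, List, Tuple
--
-- def _dedup_open_entities(items: List[Dict[str, str]]) -> List[Dict[str, str]]:
--     merged: Dict[str, Dict[str, str]] = {}
--     for item in items or []:
--         if not isinstance(item, dict):
--             continue
--         name = str(item.get("name", "")).strip()
--         desc = str(item.get("description", "")).strip()
--         if not name:
--             continue
--         key = name.lower()
--         cur = merged.get(key)
--         if cur is None or len(desc) > len(str(cur.get("description", ""))):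
--             merged[key] = {"name": name, "description": desc}
--     return list(merged.values())
-- ===== SOURCE B (Python) =====
-- from typing import Dict, List
--
--
-- def _dedup_open_entities(items: List[Dict[str, str]]) -> List[Dict[str, str]]:
--     # Two passes: group normalized entries by lowercased name, then pick each
--     # group's first longest-description entry with max().
--     groups: Dict[str, List[Dict[str, str]]] = {}
--     for item in items or []:
--         if not isinstance(item, dict):
--             continue
--         name = str(item.get("name", "")).strip()
--         if not name:
--             continue
--         desc = str(item.get("description", "")).strip()
--         groups.setdefault(name.lower(), []).append({"name": name, "description": desc})
--     return [max(g, key=lambda e: len(e["description"])) for g in groups.values()]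
-- ===== Notes on version B (the rewrite author's own statement) =====
-- stated objective: alternative
-- what changed: A keeps a single best-so-far entry per lowercased name while scanning; B first groups all normalized entries per name in one pass and then selects each group's first longest-description entry with max(), mapping over the groups.
import Mathlib
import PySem

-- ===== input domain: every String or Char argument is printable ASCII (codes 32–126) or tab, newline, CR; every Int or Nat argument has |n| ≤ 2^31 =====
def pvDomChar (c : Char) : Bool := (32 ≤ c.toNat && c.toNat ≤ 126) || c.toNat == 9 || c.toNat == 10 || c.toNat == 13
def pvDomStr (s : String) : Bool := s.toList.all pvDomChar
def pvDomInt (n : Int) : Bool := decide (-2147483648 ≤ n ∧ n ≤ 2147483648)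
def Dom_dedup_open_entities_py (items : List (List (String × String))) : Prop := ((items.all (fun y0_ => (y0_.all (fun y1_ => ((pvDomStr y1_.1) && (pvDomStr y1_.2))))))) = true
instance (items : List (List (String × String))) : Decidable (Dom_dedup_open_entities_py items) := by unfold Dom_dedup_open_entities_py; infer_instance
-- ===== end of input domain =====

-- B replaces A's keep-the-best-so-far fold by two passes (group entries per lowercased name, then pick each group's first longest-description entry with max); equal return value, alternative decomposition.

-- ===== PORT A =====
-- A keeps one best entry per key while scanning once ('isinstance(item, dict)' is always true under the List (String × String) encoding of a dict, so that branch is omitted; 'items or []' iterates items itself).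
def dedup_open_entities_py (items : List (List (String × String))) : List (List (String × String)) :=
  (items.foldl
    (fun merged item =>
      let name := PySem.Str.strip (PySem.Dict.getD (PySem.Dict.mk item) "name" "")
      let desc := PySem.Str.strip (PySem.Dict.getD (PySem.Dict.mk item) "description" "")
      if name = "" then merged
      else
        let key := PySem.Str.lower name
        match PySem.Dict.get? merged key with
        | none => PySem.Dict.insert merged key [("name", name), ("description", desc)]
        | some cur =>
          if PySem.Str.len desc > PySem.Str.len (PySem.Dict.getD (PySem.Dict.mk cur) "description" "") then
            PySem.Dict.insert merged key [("name", name), ("description", desc)]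
          else merged)
    PySem.Dict.empty).values

-- ===== PORT B =====
-- B first groups all normalized entries by key ('groups.setdefault(key, []).append(e)' = Dict.modify key [] (· ++ [e])),
-- then maps Python's max(g, key=len of description) over the groups; each group is nonempty so max never raises —
-- ported as PySem.List.max? followed by .getD [].
def dedup_open_entities_py_alt (items : List (List (String × String))) : List (List (String × String)) :=
  let groups : PySem.Dict String (List (List (String × String))) :=
    items.foldl
      (fun groups item =>
        let name := PySem.Str.strip (PySem.Dict.getD (PySem.Dict.mk item) "name" "")
        if name = "" then groups
        else
          let desc := PySem.Str.strip (PySem.Dict.getD (PySem.Dict.mk item) "description" "")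
          PySem.Dict.modify groups (PySem.Str.lower name) []
            (· ++ [[("name", name), ("description", desc)]]))
      PySem.Dict.empty
  groups.values.map
    (fun g =>
      (PySem.List.max? g
        (fun e => PySem.Str.len (PySem.Dict.getD (PySem.Dict.mk e) "description" ""))).getD [])

-- ===== PRECONDITION & SPEC =====
def Spec_dedup_open_entities_py (items : List (List (String × String))) (out : List (List (String × String))) : Prop := out = dedup_open_entities_py_alt items
instance (items : List (List (String × String))) (out : List (List (String × String))) : Decidable (Spec_dedup_open_entities_py items out) := by unfold Spec_dedup_open_entities_py; infer_instance

-- ===== CLAIM (what is proved, stated in full; the proofs are below) =====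
def Claim_equal_dedup_open_entities_py : Prop := ∀ (items : List (List (String × String))), Dom_dedup_open_entities_py items → Spec_dedup_open_entities_py items (dedup_open_entities_py items)

-- ===== LEMMAS AND PROOFS =====

-- the length-of-description key used by B's max()
def pvLenD (e : List (String × String)) : Int :=
  PySem.Str.len (PySem.Dict.getD (PySem.Dict.mk e) "description" "")

-- the winner B's max() picks from a group (first longest entry)
def pvBest (g : List (List (String × String))) : List (String × String) :=
  (PySem.List.max? g pvLenD).getD []

lemma pvLenD_pair (n d : String) :
    pvLenD [("name", n), ("description", d)] = PySem.Str.len d := by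
  simp [pvLenD, PySem.Dict.getD, PySem.Dict.get?_mk_cons]

lemma pvBest_singleton (e : List (String × String)) : pvBest [e] = e := by
  simp [pvBest, PySem.List.max?]

lemma pvBest_append (g : List (List (String × String))) (e : List (String × String)) (hg : g ≠ []) :
    pvBest (g ++ [e]) = if pvLenD (pvBest g) < pvLenD e then e else pvBest g := by
  obtain ⟨m, hm⟩ : ∃ m, PySem.List.max? g pvLenD = some m := by
    cases h : PySem.List.max? g pvLenD with
    | none => exact absurd ((PySem.List.max?_eq_none_iff g pvLenD).mp h) hg
    | some m => exact ⟨m, rfl⟩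
  have h2 : PySem.List.max? (g ++ [e]) pvLenD =
      if pvLenD m < pvLenD e then some e else some m := by
    simp only [PySem.List.max?, List.foldl_append] at hm ⊢
    rw [hm]
    simp
  rw [pvBest, pvBest, hm, h2]
  simp only [Option.getD_some]
  split_ifs <;> simp

-- first-match lookup through a value-mapped items list
lemma get?_mk_map {ν ν' : Type} (f : ν → ν') (l : List (String × ν)) (k : String) :
    (PySem.Dict.mk (l.map (fun p => (p.1, f p.2)))).get? k
      = ((PySem.Dict.mk l).get? k).map f := by
  induction l with
  | nil => simp [PySem.Dict.get?]
  | cons p t ih =>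
    simp only [List.map_cons]
    rw [show ((p.1, f p.2) :: List.map (fun p => (p.1, f p.2)) t) =
        (((p.1, f p.2) :: List.map (fun p => (p.1, f p.2)) t) : List (String × ν')) from rfl]
    rw [PySem.Dict.get?_mk_cons, PySem.Dict.get?_mk_cons]
    by_cases h : (p.1 == k) = true
    · simp [h]
    · simp only [Bool.not_eq_true] at h
      simp [h, ih]

-- the invariant: A's dict holds, key for key in the same order, the best of B's group
def pvInv (merged : PySem.Dict String (List (String × String)))
    (groups : PySem.Dict String (List (List (String × String)))) : Prop :=
  merged.items = groups.items.map (fun p => (p.1, pvBest p.2))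
  ∧ groups.keys.Nodup
  ∧ ∀ p ∈ groups.items, p.2 ≠ []

lemma pvInv_step (merged : PySem.Dict String (List (String × String)))
    (groups : PySem.Dict String (List (List (String × String))))
    (item : List (String × String)) (h : pvInv merged groups) :
    pvInv
      ((fun merged item =>
        let name := PySem.Str.strip (PySem.Dict.getD (PySem.Dict.mk item) "name" "")
        let desc := PySem.Str.strip (PySem.Dict.getD (PySem.Dict.mk item) "description" "")
        if name = "" then merged
        else
          let key := PySem.Str.lower name
          match PySem.Dict.get? merged key with
          | none => PySem.Dict.insert merged key [("name", name), ("description", desc)]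
          | some cur =>
            if PySem.Str.len desc > PySem.Str.len (PySem.Dict.getD (PySem.Dict.mk cur) "description" "") then
              PySem.Dict.insert merged key [("name", name), ("description", desc)]
            else merged) merged item)
      ((fun groups item =>
        let name := PySem.Str.strip (PySem.Dict.getD (PySem.Dict.mk item) "name" "")
        if name = "" then groups
        else
          let desc := PySem.Str.strip (PySem.Dict.getD (PySem.Dict.mk item) "description" "")
          PySem.Dict.modify groups (PySem.Str.lower name) []
            (· ++ [[("name", name), ("description", desc)]])) groups item) := by
  obtain ⟨hit, hnd, hne⟩ := h
  dsimp only
  by_cases h0 : PySem.Str.strip (PySem.Dict.getD (PySem.Dict.mk item) "name" "") = ""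
  · simp only [if_pos h0]
    exact ⟨hit, hnd, hne⟩
  · simp only [if_neg h0]
    set name := PySem.Str.strip (PySem.Dict.getD (PySem.Dict.mk item) "name" "") with hname
    set desc := PySem.Str.strip (PySem.Dict.getD (PySem.Dict.mk item) "description" "") with hdesc
    set key := PySem.Str.lower name with hkey
    set e : List (String × String) := [("name", name), ("description", desc)] with he
    have hmk : merged = PySem.Dict.mk (groups.items.map (fun p => (p.1, pvBest p.2))) :=
      PySem.Dict.ext hit
    have hget : PySem.Dict.get? merged key = Option.map pvBest (PySem.Dict.get? groups key) := by
      rw [hmk]; exact get?_mk_map pvBest groups.items key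
    cases hg : PySem.Dict.get? groups key with
    | none =>
      have hgc : groups.contains key = false :=
        (PySem.Dict.get?_eq_none_iff_contains groups key).mp hg
      have hmc : merged.contains key = false := by
        rw [PySem.Dict.contains_eq_isSome_get?, hget, hg]; rfl
      rw [hget, hg]
      simp only [Option.map_none]
      refine ⟨?_, ?_, ?_⟩
      · rw [PySem.Dict.items_insert_of_not_contains merged _ hmc,
          PySem.Dict.modify, PySem.Dict.items_insert_of_not_contains groups _ hgc,
          PySem.Dict.getD_eq_get?_getD, hg]
        simp [hit, pvBest_singleton]
      · rw [PySem.Dict.modify, PySem.Dict.keys_insert_of_not_contains groups _ hgc]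
        have : key ∉ groups.keys := fun hk =>
          by simp [(PySem.Dict.contains_iff_mem_keys groups key).mpr hk] at hgc
        have hdisj : ∀ a ∈ groups.keys, ∀ b ∈ [key], a ≠ b := by
          intro a ha b hb hab
          rw [List.mem_singleton] at hb
          subst hb; subst hab
          exact this ha
        exact (List.nodup_append).mpr ⟨hnd, List.nodup_singleton _, hdisj⟩
      · intro p hp
        rw [PySem.Dict.modify, PySem.Dict.items_insert_of_not_contains groups _ hgc,
          PySem.Dict.getD_eq_get?_getD, hg] at hp
        simp only [Option.getD_none, List.nil_append, List.mem_append, List.mem_singleton] at hp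
        rcases hp with hp | hp
        · exact hne p hp
        · subst hp; simp
    | some g =>
      have hgc : groups.contains key = true := by
        rw [PySem.Dict.contains_eq_isSome_get?, hg]; rfl
      have hmc : merged.contains key = true := by
        rw [PySem.Dict.contains_eq_isSome_get?, hget, hg]; rfl
      have hgne : g ≠ [] := by
        have : (key, g) ∈ groups.items := PySem.Dict.mem_items_of_get?_eq_some groups hg
        exact hne (key, g) this
      have hbestapp : pvBest (g ++ [e]) =
          if pvLenD (pvBest g) < pvLenD e then e else pvBest g := pvBest_append g e hgne
      have hBitems : (PySem.Dict.modify groups key [] (· ++ [e])).items =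
          List.map (fun p => if (p.1 == key) = true then (key, g ++ [e]) else p) groups.items := by
        rw [PySem.Dict.modify, PySem.Dict.getD_of_get?_eq_some groups [] hg,
          PySem.Dict.items_insert_of_contains groups _ hgc]
      have hmem_eq : ∀ p ∈ groups.items, (p.1 == key) = true → p.2 = g := by
        intro p hp hpk
        have hg' : PySem.Dict.get? groups p.1 = some p.2 :=
          PySem.Dict.get?_of_mem_items groups (by exact hp) hnd
        rw [eq_of_beq hpk, hg] at hg'
        exact (Option.some_injective _ hg'.symm)
      rw [hget, hg]
      simp only [Option.map_some]
      have hkeys : (PySem.Dict.modify groups key [] (· ++ [e])).keys = groups.keys := by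
        rw [PySem.Dict.modify, PySem.Dict.keys_insert_of_contains groups _ hgc]
      refine ⟨?_, by rw [hkeys]; exact hnd, ?_⟩
      · by_cases hc : PySem.Str.len desc > PySem.Str.len (PySem.Dict.getD (PySem.Dict.mk (pvBest g)) "description" "")
        · rw [if_pos hc, PySem.Dict.items_insert_of_contains merged _ hmc, hBitems, hit,
            List.map_map, List.map_map]
          refine List.map_congr_left (fun p hp => ?_)
          by_cases hpk : (p.1 == key) = true
          · have hpg : p.2 = g := hmem_eq p hp hpk
            simp only [Function.comp, hpk, if_pos, hpg]
            rw [hbestapp, if_pos (by rw [he, pvLenD_pair]; simpa only [pvLenD] using hc)]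
          · simp [Function.comp, hpk]
        · rw [if_neg hc, hBitems, hit, List.map_map]
          refine List.map_congr_left (fun p hp => ?_)
          by_cases hpk : (p.1 == key) = true
          · have hpg : p.2 = g := hmem_eq p hp hpk
            simp only [Function.comp, hpk, if_pos]
            rw [hbestapp, if_neg (by rw [he, pvLenD_pair]; simpa only [pvLenD] using hc), hpg,
              eq_of_beq hpk]
          · simp [Function.comp, hpk]
      · intro p hp
        rw [hBitems] at hp
        obtain ⟨q, hq, hqp⟩ := List.mem_map.mp hp
        by_cases hqk : (q.1 == key) = true
        · rw [if_pos hqk] at hqp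
          subst hqp; simp
        · rw [if_neg hqk] at hqp
          subst hqp; exact hne q hq

lemma pvInv_fold (items : List (List (String × String))) :
    ∀ (merged : PySem.Dict String (List (String × String)))
      (groups : PySem.Dict String (List (List (String × String)))),
      pvInv merged groups →
      pvInv
        (items.foldl
          (fun merged item =>
            let name := PySem.Str.strip (PySem.Dict.getD (PySem.Dict.mk item) "name" "")
            let desc := PySem.Str.strip (PySem.Dict.getD (PySem.Dict.mk item) "description" "")
            if name = "" then merged
            else
              let key := PySem.Str.lower name
              match PySem.Dict.get? merged key with
              | none => PySem.Dict.insert merged key [("name", name), ("description", desc)]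
              | some cur =>
                if PySem.Str.len desc > PySem.Str.len (PySem.Dict.getD (PySem.Dict.mk cur) "description" "") then
                  PySem.Dict.insert merged key [("name", name), ("description", desc)]
                else merged) merged)
        (items.foldl
          (fun groups item =>
            let name := PySem.Str.strip (PySem.Dict.getD (PySem.Dict.mk item) "name" "")
            if name = "" then groups
            else
              let desc := PySem.Str.strip (PySem.Dict.getD (PySem.Dict.mk item) "description" "")
              PySem.Dict.modify groups (PySem.Str.lower name) []
                (· ++ [[("name", name), ("description", desc)]])) groups) := by
  induction items with
  | nil => intro merged groups h; exact h
  | cons item rest ih =>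
    intro merged groups h
    simp only [List.foldl_cons]
    exact ih _ _ (pvInv_step merged groups item h)

-- ===== VERDICT (by name: the statement is the Claim_ definition above) =====
theorem dedup_open_entities_py_spec : Claim_equal_dedup_open_entities_py := by
  intro items _
  unfold Spec_dedup_open_entities_py dedup_open_entities_py dedup_open_entities_py_alt
  obtain ⟨hit, -, -⟩ :=
    pvInv_fold items PySem.Dict.empty PySem.Dict.empty
      ⟨rfl, List.nodup_nil, fun p hp => absurd hp (by simp [PySem.Dict.empty])⟩
  simp only [PySem.Dict.values, hit, List.map_map]
  rfl
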